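-- pv_equiv track=rewrite | github.com/wenlishi/question-bank-of-linux | ui/activation_dialog.py | _validate_activation_code
-- ===== SOURCE A (Python) =====
-- def _validate_activation_code(code):
--     """验证激活码格式"""
--     # 格式：XXXX-XXXX-XXXX-XXXX
--     parts = code.split('-')
--     if len(parts) != 4:
--         return False
--
--     for part in parts:
--         if len(part) != 4:
--             return False
--         if not all(c.isalnum() for c in part):
--             return False
--
--     return True
-- ===== SOURCE B (Python) =====
-- def _validate_activation_code(code):
--     """验证激活码格式 (positional single-pass check)"""
--     if len(code) != 19:
--         return False
--     for i, ch in enumerate(code):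
--         if i in (4, 9, 14):
--             if ch != '-':
--                 return False
--         elif not ch.isalnum():
--             return False
--     return True
-- ===== Notes on version B (the rewrite author's own statement) =====
-- stated objective: simpler
-- what changed: Replaces the split-on-dash-then-loop-over-parts check with a single positional pass: length must be 19, dash separators at positions 4, 9 and 14, every other character alphanumeric.
import Mathlib
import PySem

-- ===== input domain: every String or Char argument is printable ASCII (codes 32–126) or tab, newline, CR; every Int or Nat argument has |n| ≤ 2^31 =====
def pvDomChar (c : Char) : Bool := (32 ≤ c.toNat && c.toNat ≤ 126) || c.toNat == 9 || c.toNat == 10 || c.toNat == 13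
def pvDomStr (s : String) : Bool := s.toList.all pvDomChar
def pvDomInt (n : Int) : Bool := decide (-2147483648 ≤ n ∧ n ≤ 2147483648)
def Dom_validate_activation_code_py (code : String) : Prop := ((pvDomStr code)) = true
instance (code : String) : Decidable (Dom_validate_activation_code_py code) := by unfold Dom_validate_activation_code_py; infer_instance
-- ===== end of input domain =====

-- B replaces A's split('-')-then-loop-over-parts with one positional pass (length 19, dashes at 4/9/14, alnum elsewhere); objective: simpler.

-- ===== PORT A =====
-- the 'for part in parts' loop with its two early returns
def pvCheckParts : List (List Char) → Bool
  | [] => true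
  | p :: rest =>
    if p.length ≠ 4 then false
    else if ¬ (p.all PySem.Chars.isalnum) then false
    else pvCheckParts rest

def validate_activation_code_py (code : String) : Bool :=
  let parts := PySem.Chars.splitOn code.toList ['-']
  if parts.length ≠ 4 then false
  else pvCheckParts parts

-- ===== PORT B =====
-- the 'for i, ch in enumerate(code)' loop with its early returns
def pvAltCheck : Nat → List Char → Bool
  | _, [] => true
  | i, c :: rest =>
    (if i = 4 ∨ i = 9 ∨ i = 14 then c == '-' else PySem.Chars.isalnum c) && pvAltCheck (i + 1) rest

def validate_activation_code_py_alt (code : String) : Bool :=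
  if code.toList.length ≠ 19 then false
  else pvAltCheck 0 code.toList

-- ===== PRECONDITION & SPEC =====
def Spec_validate_activation_code_py (code : String) (out : Bool) : Prop := out = validate_activation_code_py_alt code
instance (code : String) (out : Bool) : Decidable (Spec_validate_activation_code_py code out) := by unfold Spec_validate_activation_code_py; infer_instance

-- ===== CLAIM (what is proved, stated in full; the proofs are below) =====
def Claim_equal_validate_activation_code_py : Prop := ∀ (code : String), Dom_validate_activation_code_py code → Spec_validate_activation_code_py code (validate_activation_code_py code)

-- ===== LEMMAS AND PROOFS =====

-- splitting on a single dash, written as direct structural recursion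
def pvConsHead (pre : List Char) : List (List Char) → List (List Char)
  | [] => [pre]
  | p :: ps => (pre ++ p) :: ps

def pvSplitDash : List Char → List (List Char)
  | [] => [[]]
  | c :: rest => if c = '-' then [] :: pvSplitDash rest else pvConsHead [c] (pvSplitDash rest)

lemma pvSplitDash_ne_nil (cs : List Char) : pvSplitDash cs ≠ [] := by
  induction cs with
  | nil => simp [pvSplitDash]
  | cons c rest ih =>
    simp only [pvSplitDash]
    split
    · simp
    · cases h : pvSplitDash rest with
      | nil => exact absurd h ih
      | cons p ps => simp [pvConsHead]

lemma pvConsHead_consHead (pre c : List Char) (xs : List (List Char)) :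
    pvConsHead pre (pvConsHead c xs) = pvConsHead (pre ++ c) xs := by
  cases xs <;> simp [pvConsHead]

lemma pv_go_spec (fuel : Nat) (l cur : List Char) (acc : List (List Char))
    (h : l.length < fuel) :
    PySem.Chars.splitOn.go ['-'] fuel l cur acc
      = acc.reverse ++ pvConsHead cur.reverse (pvSplitDash l) := by
  induction fuel generalizing l cur acc with
  | zero => omega
  | succ fuel ih =>
    cases l with
    | nil => simp [PySem.Chars.splitOn.go, pvSplitDash, pvConsHead]
    | cons c rest =>
      simp only [PySem.Chars.splitOn.go]
      by_cases hc : c = '-'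
      · subst hc
        rw [if_pos (by simp [List.isPrefixOf])]
        rw [ih _ _ _ (by simpa using Nat.lt_of_succ_lt_succ h)]
        simp only [pvSplitDash, if_pos]
        cases hps : pvSplitDash rest with
        | nil => exact absurd hps (pvSplitDash_ne_nil rest)
        | cons p ps => simp [pvConsHead, hps]
      · rw [if_neg (by simp only [List.isPrefixOf, Bool.and_true, beq_iff_eq]; exact fun h => hc h.symm)]
        rw [ih _ _ _ (by simpa using Nat.lt_of_succ_lt_succ h)]
        simp only [pvSplitDash, if_neg hc]
        rw [pvConsHead_consHead]
        simp

lemma pv_splitOn_eq (cs : List Char) :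
    PySem.Chars.splitOn cs ['-'] = pvSplitDash cs := by
  unfold PySem.Chars.splitOn
  rw [pv_go_spec _ _ _ _ (by omega)]
  cases h : pvSplitDash cs with
  | nil => exact absurd h (pvSplitDash_ne_nil cs)
  | cons p ps => simp [pvConsHead]

def pvJoinDash : List (List Char) → List Char
  | [] => []
  | [p] => p
  | p :: q :: ps => p ++ '-' :: pvJoinDash (q :: ps)

lemma pv_joinDash_splitDash (cs : List Char) : pvJoinDash (pvSplitDash cs) = cs := by
  induction cs with
  | nil => simp [pvSplitDash, pvJoinDash]
  | cons c rest ih =>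
    simp only [pvSplitDash]
    by_cases hc : c = '-'
    · subst hc
      rw [if_pos rfl]
      cases hps : pvSplitDash rest with
      | nil => exact absurd hps (pvSplitDash_ne_nil rest)
      | cons p ps =>
        rw [hps] at ih
        simp [pvJoinDash, ih]
    · rw [if_neg hc]
      cases hps : pvSplitDash rest with
      | nil => exact absurd hps (pvSplitDash_ne_nil rest)
      | cons p ps =>
        rw [hps] at ih
        cases ps with
        | nil => simpa [pvConsHead, pvJoinDash] using ih
        | cons q qs => simpa [pvConsHead, pvJoinDash] using ih

lemma pv_alnum_ne_dash {c : Char} (h : PySem.Chars.isalnum c = true) : ¬ c = '-' := by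
  intro hc; subst hc; exact absurd h (by decide)

lemma pv_len4 (p : List Char) (h : p.length = 4) : ∃ a b c d, p = [a,b,c,d] := by
  rcases p with _|⟨a,_|⟨b,_|⟨c,_|⟨d,_|⟨e,t⟩⟩⟩⟩⟩ <;> simp_all
  
lemma pv_A_to_B (cs : List Char)
    (h4 : (pvSplitDash cs).length = 4) (hck : pvCheckParts (pvSplitDash cs) = true) :
    cs.length = 19 ∧ pvAltCheck 0 cs = true := by
  have hj := pv_joinDash_splitDash cs
  rcases hparts : pvSplitDash cs with _|⟨p1,_|⟨p2,_|⟨p3,_|⟨p4,_|⟨p5,t⟩⟩⟩⟩⟩ <;> rw [hparts] at h4 <;> simp at h4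
  rw [hparts] at hck hj
  simp only [pvCheckParts] at hck
  split_ifs at hck with h1 ha1 h2 ha2 h3 ha3 h4' ha4
  obtain ⟨a1,a2,a3,a4,rfl⟩ := pv_len4 p1 (by omega)
  obtain ⟨b1,b2,b3,b4,rfl⟩ := pv_len4 p2 (by omega)
  obtain ⟨c1,c2,c3,c4,rfl⟩ := pv_len4 p3 (by omega)
  obtain ⟨d1,d2,d3,d4,rfl⟩ := pv_len4 p4 (by omega)
  simp [pvJoinDash] at hj
  subst hj
  simp at ha1 ha2 ha3 ha4
  simp [pvAltCheck, ha1, ha2, ha3, ha4]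

lemma pv_B_to_A (cs : List Char)
    (h19 : cs.length = 19) (hck : pvAltCheck 0 cs = true) :
    (pvSplitDash cs).length = 4 ∧ pvCheckParts (pvSplitDash cs) = true := by
  rcases cs with _|⟨c0,_|⟨c1,_|⟨c2,_|⟨c3,_|⟨c4,_|⟨c5,_|⟨c6,_|⟨c7,_|⟨c8,_|⟨c9,_|⟨c10,_|⟨c11,_|⟨c12,_|⟨c13,_|⟨c14,_|⟨c15,_|⟨c16,_|⟨c17,_|⟨c18,_|⟨c19,t⟩⟩⟩⟩⟩⟩⟩⟩⟩⟩⟩⟩⟩⟩⟩⟩⟩⟩⟩⟩ <;> simp at h19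
  simp [pvAltCheck] at hck
  obtain ⟨h0,h1,h2,h3,hd4,h5,h6,h7,h8,hd9,h10,h11,h12,h13,hd14,h15,h16,h17,h18⟩ := hck
  subst hd4 hd9 hd14
  simp [pvSplitDash, pvConsHead, pv_alnum_ne_dash h0, pv_alnum_ne_dash h1, pv_alnum_ne_dash h2,
    pv_alnum_ne_dash h3, pv_alnum_ne_dash h5, pv_alnum_ne_dash h6, pv_alnum_ne_dash h7,
    pv_alnum_ne_dash h8, pv_alnum_ne_dash h10, pv_alnum_ne_dash h11, pv_alnum_ne_dash h12,
    pv_alnum_ne_dash h13, pv_alnum_ne_dash h15, pv_alnum_ne_dash h16, pv_alnum_ne_dash h17,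
    pv_alnum_ne_dash h18, pvCheckParts, h0,h1,h2,h3,h5,h6,h7,h8,h10,h11,h12,h13,h15,h16,h17,h18]

lemma pv_core (cs : List Char) :
    (if (PySem.Chars.splitOn cs ['-']).length ≠ 4 then false
     else pvCheckParts (PySem.Chars.splitOn cs ['-']))
      = (if cs.length ≠ 19 then false else pvAltCheck 0 cs) := by
  rw [pv_splitOn_eq]
  rw [Bool.eq_iff_iff]
  constructor
  · intro h
    split_ifs at h with hp
    have := pv_A_to_B cs (by omega) h
    simp [this.1, this.2]
  · intro h
    split_ifs at h with hp
    have := pv_B_to_A cs (by omega) h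
    simp [this.1, this.2]

-- ===== VERDICT (by name: the statement is the Claim_ definition above) =====
theorem validate_activation_code_py_spec : Claim_equal_validate_activation_code_py := by
  intro code _
  unfold Spec_validate_activation_code_py validate_activation_code_py validate_activation_code_py_alt
  exact pv_core code.toList
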